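-- pv_equiv track=rewrite | github.com/MukeshathS/EverythingPython | Python Learning/Filter-1-1.py | sampleFilter
-- ===== SOURCE A (Python) =====
-- def sampleFilter(n):
--     div_by_seven_list = list(
--         filter(
--             lambda num: num % 7 == 0,
--             [i for i in range(1, n + 1)]
--         )
--     )
--     return div_by_seven_list
-- ===== SOURCE B (Python) =====
-- def sampleFilter(n):
--     # Generate the multiples of 7 directly by stepping, no per-element test.
--     return list(range(7, n + 1, 7))
-- ===== Notes on version B (the rewrite author's own statement) =====
-- stated objective: faster
-- what changed: Replaces building the full list 1..n and filtering it with a %7 test by generating the multiples of 7 directly with range(7, n+1, 7).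
import Mathlib
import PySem

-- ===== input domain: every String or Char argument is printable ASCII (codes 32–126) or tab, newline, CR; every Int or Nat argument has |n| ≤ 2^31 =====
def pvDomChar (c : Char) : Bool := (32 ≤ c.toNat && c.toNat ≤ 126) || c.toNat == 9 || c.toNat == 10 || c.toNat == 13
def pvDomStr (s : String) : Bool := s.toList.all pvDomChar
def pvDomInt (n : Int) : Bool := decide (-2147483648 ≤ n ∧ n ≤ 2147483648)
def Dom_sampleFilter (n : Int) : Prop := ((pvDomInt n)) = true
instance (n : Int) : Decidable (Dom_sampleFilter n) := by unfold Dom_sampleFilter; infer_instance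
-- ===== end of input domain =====

-- B generates the multiples of 7 directly with range(7, n+1, 7) instead of filtering 1..n with a %7 test.

-- ===== PORT A =====
def sampleFilter (n : Int) : List Int :=
  let div_by_seven_list :=
    ((PySem.List.pyRange 1 (n + 1) 1).map (fun i => i)).filter
      (fun num => PySem.Int.mod num 7 == 0)
  div_by_seven_list

-- ===== PORT B =====
def sampleFilter_alt (n : Int) : List Int :=
  PySem.List.pyRange 7 (n + 1) 7

-- ===== PRECONDITION & SPEC =====
def Spec_sampleFilter (n : Int) (out : List Int) : Prop := out = sampleFilter_alt n
instance (n : Int) (out : List Int) : Decidable (Spec_sampleFilter n out) := by unfold Spec_sampleFilter; infer_instance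

-- ===== CLAIM (what is proved, stated in full; the proofs are below) =====
def Claim_equal_sampleFilter : Prop := ∀ (n : Int), Dom_sampleFilter n → Spec_sampleFilter n (sampleFilter n)

-- ===== LEMMAS AND PROOFS =====

theorem sampleFilter_mem (n x : Int) :
    x ∈ sampleFilter n ↔ x ∈ sampleFilter_alt n := by
  simp only [sampleFilter, sampleFilter_alt, List.map_id', List.mem_filter,
    PySem.List.mem_pyRange_one, beq_iff_eq, PySem.Int.mod_eq_zero_iff_dvd,
    PySem.List.mem_pyRange_iff_of_pos (by omega : (0:Int) < 7)]
  omega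

theorem sampleFilter_pairwise (n : Int) : (sampleFilter n).Pairwise (· < ·) := by
  simp only [sampleFilter, List.map_id']
  exact (PySem.List.pairwise_lt_pyRange_one 1 (n + 1)).filter _

theorem sampleFilter_alt_pairwise (n : Int) : (sampleFilter_alt n).Pairwise (· < ·) := by
  unfold sampleFilter_alt
  rw [PySem.List.pyRange_of_pos 7 (n + 1) (by omega : (0:Int) < 7)]
  refine List.pairwise_map.mpr ?_
  exact (List.pairwise_lt_range).imp (by intro a b h; omega)

theorem pairwise_lt_nodup (l : List Int) (h : l.Pairwise (· < ·)) : l.Nodup :=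
  h.imp (fun hlt => ne_of_lt hlt)

-- ===== VERDICT (by name: the statement is the Claim_ definition above) =====
theorem sampleFilter_spec : Claim_equal_sampleFilter := by
  intro n _
  unfold Spec_sampleFilter
  have hp := sampleFilter_pairwise n
  have hq := sampleFilter_alt_pairwise n
  exact ((List.perm_ext_iff_of_nodup (pairwise_lt_nodup _ hp)
    (pairwise_lt_nodup _ hq)).mpr (sampleFilter_mem n)).eq_of_pairwise (fun _ _ _ _ h1 h2 => (lt_asymm h1 h2).elim) hp hq
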